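-- pv_equiv track=rewrite | github.com/AdhamIsHere/Ramadan | main.py | get_reaction_sound
-- ===== SOURCE A (Python) =====
-- def get_reaction_sound(gesture, expression):
--     """
--     Returns the appropriate sound file based on current gesture and expression
--     """
--     # Clean up gesture and expression strings
--     gesture_clean = gesture.split("(")[0].strip() if "(" in gesture else gesture.strip()
--     expression_clean = expression.split("/")[0].strip()
--
--     # Define sound mappings for gesture + expression combinations
--     sound_mappings = {
--         # Happy + Pointing = cheerful sound
--         ("Pointing_Up", "Neutral"): "sound/happy_point_up.wav",
--
--         # Sad face with no gesture = sad sound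
--         ("No gesture", "Sad"): "sound/sad.wav",
--         (None, "Sad"): "sound/sad_music.mp3",
--
--         ("No gesture", "Happy"): "sound/happy.wav",
--         ("Thumb_Up", "Neutral"): "sound/thumb_up.wav",
--         ("Open_Palm", "Neutral"): "sound/palm.wav",
--
--         # Default fallbacks
--         ("No gesture", "Neutral"): "sound/neutral_ambient.ogg",
--     }
--
--     # Try to find exact match first
--     key = (gesture_clean, expression_clean)
--     if key in sound_mappings:
--         return sound_mappings[key]
--
--     # Try gesture-only match
--     for (g, e), sound_path in sound_mappings.items():
--         if g == gesture_clean: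
--             return sound_path
--
--     # Try expression-only match
--     for (g, e), sound_path in sound_mappings.items():
--         if e == expression_clean:
--             return sound_path
--
--     # Return None if no match found
--     return None
-- ===== SOURCE B (Python) =====
-- def get_reaction_sound(gesture, expression):
--     """
--     Returns the appropriate sound file based on current gesture and expression
--     """
--     g = gesture.split("(")[0].strip() if "(" in gesture else gesture.strip()
--     e = expression.split("/")[0].strip()
--     # The fixed mapping plus A's exact/gesture/expression fallback order is
--     # partially evaluated into one decision tree: no table, no scans.
--     if g == "Pointing_Up":
--         return "sound/happy_point_up.wav"
--     if g == "Thumb_Up":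
--         return "sound/thumb_up.wav"
--     if g == "Open_Palm":
--         return "sound/palm.wav"
--     if g == "No gesture":
--         if e == "Happy":
--             return "sound/happy.wav"
--         if e == "Neutral":
--             return "sound/neutral_ambient.ogg"
--         return "sound/sad.wav"
--     # unknown gesture: first mapping entry with this expression
--     if e == "Neutral":
--         return "sound/happy_point_up.wav"
--     if e == "Sad":
--         return "sound/sad.wav"
--     if e == "Happy":
--         return "sound/happy.wav"
--     return None
-- ===== Notes on version B (the rewrite author's own statement) =====
-- stated objective: simpler
-- what changed: A's fixed 7-entry mapping with its exact-key / gesture-only-scan / expression-only-scan fallback is partially evaluated into a single hard-coded decision tree over the cleaned strings: no dict is built and no scans are run.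
import Mathlib
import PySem

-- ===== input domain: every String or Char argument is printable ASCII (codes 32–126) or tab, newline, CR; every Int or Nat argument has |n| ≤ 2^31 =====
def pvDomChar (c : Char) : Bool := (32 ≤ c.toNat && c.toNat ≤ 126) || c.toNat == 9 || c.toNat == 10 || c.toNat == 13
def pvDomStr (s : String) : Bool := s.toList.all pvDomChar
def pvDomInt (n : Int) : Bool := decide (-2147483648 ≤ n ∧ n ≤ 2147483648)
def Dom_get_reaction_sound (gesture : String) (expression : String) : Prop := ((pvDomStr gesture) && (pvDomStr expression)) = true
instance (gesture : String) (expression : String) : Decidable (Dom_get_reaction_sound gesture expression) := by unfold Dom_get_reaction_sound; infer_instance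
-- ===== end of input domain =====

-- B partially evaluates A's fixed mapping plus its three-stage fallback into one
-- hard-coded decision tree over the cleaned strings (objective: simpler).

-- ===== PORT A =====
def pvMappings : List ((Option String × String) × String) :=
  [((some "Pointing_Up", "Neutral"), "sound/happy_point_up.wav"),
   ((some "No gesture", "Sad"), "sound/sad.wav"),
   ((none, "Sad"), "sound/sad_music.mp3"),
   ((some "No gesture", "Happy"), "sound/happy.wav"),
   ((some "Thumb_Up", "Neutral"), "sound/thumb_up.wav"),
   ((some "Open_Palm", "Neutral"), "sound/palm.wav"),
   ((some "No gesture", "Neutral"), "sound/neutral_ambient.ogg")]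

-- A after string cleaning: exact dict hit, then gesture-only scan, then expression-only scan
def pvLookupA (gc : String) (ec : String) : Option String :=
  let sm := PySem.Dict.ofList pvMappings
  let key : Option String × String := (some gc, ec)
  if sm.contains key then sm.get? key
  else
    match sm.items.find? (fun p => p.1.1 == some gc) with
    | some p => some p.2
    | none =>
      match sm.items.find? (fun p => p.1.2 == ec) with
      | some p => some p.2
      | none => none

def get_reaction_sound (gesture : String) (expression : String) : Option String :=
  let gesture_clean :=
    if PySem.Str.isIn "(" gesture then
      PySem.Str.strip (((PySem.Str.split? gesture "(").getD []).headD "")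
    else PySem.Str.strip gesture
  let expression_clean := PySem.Str.strip (((PySem.Str.split? expression "/").getD []).headD "")
  pvLookupA gesture_clean expression_clean

-- ===== PORT B =====

-- B after string cleaning: the decision tree (if-chain), exactly Source B's branches
def pvTreeB (g : String) (e : String) : Option String :=
  if g == "Pointing_Up" then some "sound/happy_point_up.wav"
  else if g == "Thumb_Up" then some "sound/thumb_up.wav"
  else if g == "Open_Palm" then some "sound/palm.wav"
  else if g == "No gesture" then
    if e == "Happy" then some "sound/happy.wav"
    else if e == "Neutral" then some "sound/neutral_ambient.ogg"
    else some "sound/sad.wav"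
  else if e == "Neutral" then some "sound/happy_point_up.wav"
  else if e == "Sad" then some "sound/sad.wav"
  else if e == "Happy" then some "sound/happy.wav"
  else none

def get_reaction_sound_alt (gesture : String) (expression : String) : Option String :=
  let g :=
    if PySem.Str.isIn "(" gesture then
      PySem.Str.strip (((PySem.Str.split? gesture "(").getD []).headD "")
    else PySem.Str.strip gesture
  let e := PySem.Str.strip (((PySem.Str.split? expression "/").getD []).headD "")
  pvTreeB g e

-- ===== PRECONDITION & SPEC =====
def Spec_get_reaction_sound (gesture : String) (expression : String) (out : Option String) : Prop := out = get_reaction_sound_alt gesture expression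
instance (gesture : String) (expression : String) (out : Option String) : Decidable (Spec_get_reaction_sound gesture expression out) := by unfold Spec_get_reaction_sound; infer_instance

-- ===== CLAIM (what is proved, stated in full; the proofs are below) =====
def Claim_equal_get_reaction_sound : Prop := ∀ (gesture : String) (expression : String), Dom_get_reaction_sound gesture expression → Spec_get_reaction_sound gesture expression (get_reaction_sound gesture expression)

-- ===== LEMMAS AND PROOFS =====
lemma pvOfList_eq : PySem.Dict.ofList pvMappings = PySem.Dict.mk pvMappings := by decide

set_option maxHeartbeats 1000000 in
lemma pvLookup_eq (gc ec : String) : pvLookupA gc ec = pvTreeB gc ec := by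
  rw [pvLookupA, pvTreeB, pvOfList_eq]
  simp only [pvMappings, PySem.Dict.contains_mk,
    List.find?, PySem.Dict.get?, beq_iff_eq, Prod.mk.injEq,
    Option.some.injEq, List.any_cons, List.any_nil, Bool.or_eq_true]
  by_cases h1 : gc = "Pointing_Up" <;> by_cases h2 : gc = "No gesture" <;>
    by_cases h3 : gc = "Thumb_Up" <;> by_cases h4 : gc = "Open_Palm" <;>
    by_cases e1 : ec = "Neutral" <;> by_cases e2 : ec = "Sad" <;> by_cases e3 : ec = "Happy" <;>
    simp_all [beq_eq_decide, eq_comm]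

-- ===== VERDICT (by name: the statement is the Claim_ definition above) =====
theorem get_reaction_sound_spec : Claim_equal_get_reaction_sound := by
  intro g e _
  unfold Spec_get_reaction_sound get_reaction_sound get_reaction_sound_alt
  exact pvLookup_eq _ _
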